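-- pv_equiv track=rewrite | github.com/jim0607/Leetcode | Solutions/1240.Tiling-a-Rectangle-with-the-Fewest-Squares.py | lowest_unfilled_area
-- ===== SOURCE A (Python) =====
-- def lowest_unfilled_area(heights, m):
--     """
--     find the location and the shape of the lowest unfilled area in the skyline
--     return left_idx of that area, and width and height of that area
--     """
--     min_h = min(heights)
--     left_idx = heights.index(min_h)
--     height = m - min_h
--
--     right_idx = left_idx
--     while right_idx < len(heights) and heights[right_idx] == min_h:
--         right_idx += 1
--     width = right_idx - left_idx
--
--     return left_idx, height, width
-- ===== SOURCE B (Python) =====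
-- def lowest_unfilled_area(heights, m):
--     """
--     find the location and the shape of the lowest unfilled area in the skyline
--     return left_idx of that area, and width and height of that area
--     """
--     min_h = heights[0]
--     left_idx = 0
--     width = 1
--     for i, h in enumerate(heights[1:], 1):
--         if h < min_h:
--             min_h, left_idx, width = h, i, 1
--         elif h == min_h and i == left_idx + width:
--             width += 1
--     return left_idx, m - min_h, width
-- ===== Notes on version B (the rewrite author's own statement) =====
-- stated objective: alternative
-- what changed: Replaces A's three passes (min(), list.index(), and a while-loop run scan) by a single left-to-right scan that maintains the running minimum, its first index, and the length of the contiguous run of that minimum; it trades A's C-level builtins for one fused Python loop.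
import Mathlib
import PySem

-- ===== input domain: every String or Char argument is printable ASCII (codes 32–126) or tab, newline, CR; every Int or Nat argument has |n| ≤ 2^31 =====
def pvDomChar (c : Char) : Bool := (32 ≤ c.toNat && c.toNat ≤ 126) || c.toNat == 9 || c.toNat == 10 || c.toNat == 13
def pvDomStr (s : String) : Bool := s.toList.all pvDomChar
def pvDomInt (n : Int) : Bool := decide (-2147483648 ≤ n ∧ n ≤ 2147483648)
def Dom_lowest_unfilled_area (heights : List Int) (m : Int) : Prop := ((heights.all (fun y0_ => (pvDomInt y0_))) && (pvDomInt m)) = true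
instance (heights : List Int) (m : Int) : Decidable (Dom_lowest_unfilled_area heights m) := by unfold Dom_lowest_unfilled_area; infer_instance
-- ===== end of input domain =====

-- B fuses A's three scans (min, index, while-run) into one left-to-right scan; equivalence proved for nonempty heights.

-- ===== PORT A =====
-- A's while loop: advance right_idx while in range and heights[right_idx] == min_h
def pvAwhile (heights : List Int) (min_h : Int) (r : Nat) : Nat :=
  if h : r < heights.length ∧ PySem.List.pyGetD heights (r : Int) 0 = min_h then
    pvAwhile heights min_h (r + 1)
  else r
termination_by heights.length - r
decreasing_by omega

def lowest_unfilled_area (heights : List Int) (m : Int) : Int × Int × Int :=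
  match PySem.List.min? heights (fun y => y) with
  | none => (0, 0, 0)  -- Python: min([]) raises ValueError; excluded by Pre_
  | some min_h =>
    match PySem.List.index? heights min_h with
    | none => (0, 0, 0)  -- unreachable: min_h ∈ heights
    | some left_idx =>
      let right_idx := pvAwhile heights min_h left_idx
      ((left_idx : Int), m - min_h, (right_idx : Int) - (left_idx : Int))

-- ===== PORT B =====
-- B's single loop over enumerate(heights[1:], 1) with state (min_h, left_idx, width)
def pvBloop (l : List Int) (i min_h left_idx width : Int) : Int × Int × Int :=
  match l with
  | [] => (left_idx, min_h, width)
  | h :: t =>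
    if h < min_h then pvBloop t (i + 1) h i 1
    else if h = min_h ∧ i = left_idx + width then pvBloop t (i + 1) min_h left_idx (width + 1)
    else pvBloop t (i + 1) min_h left_idx width

def lowest_unfilled_area_alt (heights : List Int) (m : Int) : Int × Int × Int :=
  match heights with
  | [] => (0, 0, 0)  -- Python: heights[0] raises IndexError; excluded by Pre_
  | h0 :: t =>
    let s := pvBloop t 1 h0 0 1
    (s.1, m - s.2.1, s.2.2)

-- ===== PRECONDITION & SPEC =====
-- Pre_ excludes only the empty list, on which A raises ValueError (and B raises IndexError).
def Pre_lowest_unfilled_area (heights : List Int) (m : Int) : Prop := heights ≠ []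
instance (heights : List Int) (m : Int) : Decidable (Pre_lowest_unfilled_area heights m) := by unfold Pre_lowest_unfilled_area; infer_instance
def pvWitness_lowest_unfilled_area : List Int × Int := ([3, 1, 1, 2], 4)

def Spec_lowest_unfilled_area (heights : List Int) (m : Int) (out : Int × Int × Int) : Prop := out = lowest_unfilled_area_alt heights m
instance (heights : List Int) (m : Int) (out : Int × Int × Int) : Decidable (Spec_lowest_unfilled_area heights m out) := by unfold Spec_lowest_unfilled_area; infer_instance

-- ===== CLAIM (what is proved, stated in full; the proofs are below) =====
def Claim_equal_lowest_unfilled_area : Prop := ∀ (heights : List Int) (m : Int), Dom_lowest_unfilled_area heights m → Pre_lowest_unfilled_area heights m → Spec_lowest_unfilled_area heights m (lowest_unfilled_area heights m)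

-- ===== LEMMAS AND PROOFS =====

-- the common characterisation of the result on x :: r
def specMin (x : Int) (r : List Int) : Int := r.foldl min x
def specIdx (x : Int) (r : List Int) : Nat := (PySem.List.index? (x :: r) (specMin x r)).getD 0
def specW (x : Int) (r : List Int) : Nat :=
  (((x :: r).drop (specIdx x r)).takeWhile (fun y => y == specMin x r)).length

lemma foldl_min_le (r : List Int) : ∀ (x y : Int), y ∈ x :: r → r.foldl min x ≤ y := by
  induction r with
  | nil => intro x y hy; simp at hy; simp [hy]
  | cons a r ih =>
    intro x y hy
    have h1 : (a :: r).foldl min x = r.foldl min (min x a) := rfl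
    rw [h1]
    rcases List.mem_cons.1 hy with h | h
    · exact le_trans (le_trans (ih (min x a) (min x a) (List.mem_cons_self)) (min_le_left _ _)) (le_of_eq h.symm)
    · rcases List.mem_cons.1 h with h2 | h2
      · exact le_trans (le_trans (ih (min x a) (min x a) (List.mem_cons_self)) (min_le_right _ _)) (le_of_eq h2.symm)
      · exact ih (min x a) y (List.mem_cons_of_mem _ h2)

lemma foldl_min_mem (r : List Int) : ∀ x : Int, r.foldl min x ∈ x :: r := by
  induction r with
  | nil => intro x; simp
  | cons a r ih =>
    intro x
    have h1 : (a :: r).foldl min x = r.foldl min (min x a) := rfl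
    rw [h1]
    rcases List.mem_cons.1 (ih (min x a)) with h | h
    · rcases min_choice x a with h2 | h2
      · rw [h.trans h2]; exact List.mem_cons_self
      · rw [h.trans h2]; exact List.mem_cons_of_mem _ List.mem_cons_self
    · exact List.mem_cons_of_mem _ (List.mem_cons_of_mem _ h)

lemma takeWhile_append_of_lt {p : Int → Bool} (l s : List Int)
    (h : (l.takeWhile p).length < l.length) : ((l ++ s).takeWhile p) = l.takeWhile p := by
  induction l with
  | nil => simp at h
  | cons a t ih =>
    by_cases hp : p a
    · simp only [List.cons_append, List.takeWhile_cons, hp, if_true, List.length_cons] at *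
      rw [ih (by omega)]
    · simp [List.takeWhile_cons, hp]

lemma takeWhile_append_all {p : Int → Bool} (l s : List Int)
    (h : ∀ y ∈ l, p y = true) : ((l ++ s).takeWhile p) = l ++ s.takeWhile p := by
  induction l with
  | nil => simp
  | cons a t ih =>
    have ha : p a = true := h a List.mem_cons_self
    simp only [List.cons_append, List.takeWhile_cons, ha, if_true]
    rw [ih (fun y hy => h y (List.mem_cons_of_mem _ hy))]

lemma takeWhile_full_all {p : Int → Bool} (l : List Int)
    (h : (l.takeWhile p).length = l.length) : ∀ y ∈ l, p y = true := by
  have hpre : l.takeWhile p = l := (List.takeWhile_prefix p).eq_of_length h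
  intro y hy
  exact List.mem_takeWhile_imp (hpre ▸ hy)

lemma awhile_eq (heights : List Int) (mh : Int) (r : Nat) (hr : r ≤ heights.length) :
    pvAwhile heights mh r = r + ((heights.drop r).takeWhile (fun y => y == mh)).length := by
  fun_induction pvAwhile heights mh r with
  | case1 r h ih =>
    obtain ⟨hlt, hval⟩ := h
    have hget : PySem.List.pyGetD heights (r : Int) 0 = heights[r] := by
      simp [PySem.List.pyGetD, List.getElem?_eq_getElem hlt]
    have hdrop : heights.drop r = heights[r] :: heights.drop (r + 1) :=
      List.drop_eq_getElem_cons hlt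
    rw [hdrop, List.takeWhile_cons]
    have : (heights[r] == mh) = true := by
      rw [hget] at hval; simp [hval]
    rw [this]
    simp only [if_true, List.length_cons]
    rw [ih (by omega)]
    omega
  | case2 r h =>
    rcases Nat.lt_or_ge r heights.length with hlt | hge
    · have hval : PySem.List.pyGetD heights (r : Int) 0 ≠ mh := by
        intro hc; exact h ⟨hlt, hc⟩
      have hget : PySem.List.pyGetD heights (r : Int) 0 = heights[r] := by
        simp [PySem.List.pyGetD, List.getElem?_eq_getElem hlt]
      have hdrop : heights.drop r = heights[r] :: heights.drop (r + 1) :=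
        List.drop_eq_getElem_cons hlt
      rw [hdrop, List.takeWhile_cons]
      have : (heights[r] == mh) = false := by
        rw [hget] at hval; simp [hval]
      rw [this]
      simp
    · have : heights.drop r = [] := List.drop_eq_nil_of_le hge
      simp [this]

lemma bloop_go (x : Int) (t : List Int) : ∀ (r : List Int) (mh li w : Int),
    mh = specMin x r →
    PySem.List.index? (x :: r) mh = some li.toNat →
    0 ≤ li →
    w = (((x :: r).drop li.toNat).takeWhile (fun y => y == mh)).length →
    pvBloop t (((x :: r).length : Nat) : Int) mh li w
      = ((specIdx x (r ++ t) : Int), specMin x (r ++ t), (specW x (r ++ t) : Int)) := by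
  induction t with
  | nil =>
    intro r mh li w h1 h2 hli h3
    have hidx : specIdx x r = li.toNat := by
      unfold specIdx; rw [← h1, h2]; rfl
    have hW : (specW x r : Int) = w := by
      unfold specW; rw [hidx, ← h1, ← h3]
    simp only [pvBloop, List.append_nil]
    refine Prod.ext ?_ (Prod.ext ?_ ?_)
    · simp [hidx, Int.toNat_of_nonneg hli]
    · simp [h1]
    · simp [hW]
  | cons h t ih =>
    intro r mh li w h1 h2 hli h3
    have hmem : mh ∈ x :: r := h1 ▸ foldl_min_mem r x
    have hmin_le : ∀ y ∈ x :: r, mh ≤ y := fun y hy => h1 ▸ foldl_min_le r x y hy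
    obtain ⟨hk, hval, hfirst⟩ := PySem.List.getElem_of_index?_eq_some h2
    have hw0 : 0 ≤ w := h3 ▸ Int.natCast_nonneg _
    have hmin' : ∀ hh : Int, (r ++ [hh]).foldl min x = min mh hh := by
      intro hh
      rw [List.foldl_append, h1]
      rfl
    have happ : r ++ h :: t = (r ++ [h]) ++ t := by simp
    have hlen' : (((x :: r).length : Nat) : Int) + 1 = (((x :: (r ++ [h])).length : Nat) : Int) := by
      simp
    have hdropapp : (x :: (r ++ [h])).drop li.toNat
        = ((x :: r).drop li.toNat) ++ [h] := by
      rw [← List.cons_append, List.drop_append_of_le_length (le_of_lt hk)]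
    have htwle := (List.takeWhile_prefix (l := (x :: r).drop li.toNat) (fun y => y == mh)).length_le
    have hdroplen : ((x :: r).drop li.toNat).length = (x :: r).length - li.toNat := by
      simp
    simp only [pvBloop]
    by_cases hlt : h < mh
    · rw [if_pos hlt, happ, hlen']
      apply ih (r ++ [h]) h (((x :: r).length : Nat) : Int) 1
      · rw [show specMin x (r ++ [h]) = min mh h from hmin' h, min_eq_right (le_of_lt hlt)]
      · have hnm : h ∉ x :: r := fun hc => absurd (hmin_le h hc) (not_le.2 hlt)
        rw [← List.cons_append, PySem.List.index?_append_singleton_self _ h hnm]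
        simp
      · exact Int.natCast_nonneg _
      · rw [show ((((x :: r).length : Nat) : Int)).toNat = (x :: r).length by simp]
        have : (x :: (r ++ [h])) = (x :: r) ++ [h] := by simp
        rw [this, List.drop_left]
        simp
    · rw [if_neg hlt]
      have hmh_le : mh ≤ h := not_lt.1 hlt
      have hmineq : specMin x (r ++ [h]) = mh := by
        rw [show specMin x (r ++ [h]) = min mh h from hmin' h, min_eq_left hmh_le]
      have hidx' : PySem.List.index? (x :: (r ++ [h])) mh = some li.toNat := by
        rw [← List.cons_append, PySem.List.index?_append_of_mem _ hmem]
        exact h2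
      by_cases hcond : h = mh ∧ (((x :: r).length : Nat) : Int) = li + w
      · rw [if_pos hcond, happ, hlen']
        -- the run reaches the end of the processed prefix and h extends it
        obtain ⟨hceq, hci⟩ := hcond
        have hfull2 : (((x :: r).drop li.toNat).takeWhile (fun y => y == mh)).length
            = ((x :: r).drop li.toNat).length := by
          rw [hdroplen]; omega
        have hall : ∀ y ∈ (x :: r).drop li.toNat, (y == mh) = true :=
          takeWhile_full_all _ hfull2
        apply ih (r ++ [h]) mh li (w + 1)
        · exact hmineq.symm
        · exact hidx'
        · exact hli
        · have hb : List.takeWhile (fun y => y == mh) [h] = [h] := by simp [hceq]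
          rw [hdropapp, takeWhile_append_all _ _ hall, hb, List.length_append]
          simp only [List.length_cons, List.length_nil]
          omega
      · rw [if_neg hcond, happ, hlen']
        apply ih (r ++ [h]) mh li w
        · exact hmineq.symm
        · exact hidx'
        · exact hli
        · rw [hdropapp]
          by_cases hfull : (((x :: r).drop li.toNat).takeWhile (fun y => y == mh)).length
              = ((x :: r).drop li.toNat).length
          · -- run fills the prefix; then h ≠ mh, so takeWhile stops at h
            have hne : h ≠ mh := by
              intro hc
              apply hcond
              refine ⟨hc, ?_⟩
              rw [hdroplen] at hfull
              omega
            have hall := takeWhile_full_all _ hfull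
            have hb : List.takeWhile (fun y => y == mh) [h] = [] := by simp [hne]
            rw [takeWhile_append_all _ _ hall, hb, List.append_nil]
            rw [h3, hfull]
          · have hlt2 : (((x :: r).drop li.toNat).takeWhile (fun y => y == mh)).length
                < ((x :: r).drop li.toNat).length := lt_of_le_of_ne htwle hfull
            rw [takeWhile_append_of_lt _ _ hlt2]
            exact h3

-- ===== VERDICT (by name: the statement is the Claim_ definition above) =====
lemma alt_eq_spec (x : Int) (t : List Int) (m : Int) :
    lowest_unfilled_area_alt (x :: t) m
      = ((specIdx x t : Int), m - specMin x t, (specW x t : Int)) := by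
  have h0 := bloop_go x t [] x 0 1 rfl
    (by simpa using PySem.List.index?_cons_self x []) le_rfl (by simp)
  simp only [List.nil_append] at h0
  have h1 : (((x :: ([] : List Int)).length : Nat) : Int) = 1 := by simp
  rw [h1] at h0
  simp only [lowest_unfilled_area_alt]
  rw [h0]

lemma a_eq_spec (x : Int) (t : List Int) (m : Int) :
    lowest_unfilled_area (x :: t) m
      = ((specIdx x t : Int), m - specMin x t, (specW x t : Int)) := by
  have hmem : specMin x t ∈ x :: t := foldl_min_mem t x
  have hs : (PySem.List.index? (x :: t) (specMin x t)).isSome :=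
    (PySem.List.index?_isSome_iff _ _).2 hmem
  obtain ⟨k, hk⟩ := Option.isSome_iff_exists.1 hs
  have hkidx : specIdx x t = k := by unfold specIdx; rw [hk]; rfl
  obtain ⟨hklt, -, -⟩ := PySem.List.getElem_of_index?_eq_some hk
  have hwhile := awhile_eq (x :: t) (specMin x t) k (le_of_lt hklt)
  simp only [lowest_unfilled_area, PySem.List.min?_id_cons]
  rw [show List.foldl min x t = specMin x t from rfl, hk]
  show ((k : Int), m - specMin x t,
      ((pvAwhile (x :: t) (specMin x t) k : Nat) : Int) - (k : Int)) = _
  rw [hwhile]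
  refine Prod.ext ?_ (Prod.ext rfl ?_)
  · simp [hkidx]
  · simp only [specW, hkidx]
    push_cast
    ring

theorem lowest_unfilled_area_spec : Claim_equal_lowest_unfilled_area := by
  intro heights m _ hpre
  unfold Spec_lowest_unfilled_area
  match heights with
  | [] => exact absurd rfl hpre
  | x :: t => rw [a_eq_spec, alt_eq_spec]
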